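-- pv_equiv track=rewrite | github.com/joshming/Python_Projects | a1/club_functions.py | get_last_to_first
-- ===== SOURCE A (Python) =====
-- from typing import List, Tuple, Dict, TextIO
--
-- def update_dict(key: str, value: str,
--                 key_to_values: Dict[str, List[str]]) -> None:
--     """Update key_to_values with key/value. If key is in key_to_values,
--     and value is not already in the list associated with key,
--     append value to the list. Otherwise, add the pair key/[value] to
--     key_to_values.
--
--     >>> d = {'1': ['a', 'b']}
--     >>> update_dict('2', 'c', d)
--     >>> d == {'1': ['a', 'b'], '2': ['c']}
--     True
--     >>> update_dict('1', 'c', d)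
--     >>> d == {'1': ['a', 'b', 'c'], '2': ['c']}
--     True
--     >>> update_dict('1', 'c', d)
--     >>> d == {'1': ['a', 'b', 'c'], '2': ['c']}
--     True
--     """
--
--     if key not in key_to_values:
--         key_to_values[key] = []
--
--     if value not in key_to_values[key]:
--         key_to_values[key].append(value)
--
-- def get_last_to_first(
--         person_to_friends: Dict[str, List[str]]) -> Dict[str, List[str]]:
--     """Return a "last name to first name(s)" dictionary with the people from the
--     "person to friends" dictionary person_to_friends.
--
--     >>> get_last_to_first(P2F) == {
--     ...    'Katsopolis': ['Jesse'],
--     ...    'Tanner': ['Danny R', 'Michelle', 'Stephanie J'],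
--     ...    'Gladstone': ['Joey'],
--     ...    'Donaldson-Katsopolis': ['Rebecca'],
--     ...    'Gibbler': ['Kimmy'],
--     ...    'Tanner-Fuller': ['DJ']}
--     True
--     """
--     l2f = {}
--     i = 0
--     for name in person_to_friends:
--         full_name = name.rsplit(' ', 1)
--         last = full_name[-1]
--         first = [full_name[0]]
--         update_dict(last, first[0], l2f)
--
--         for friend in person_to_friends[name]:
--             full_name = friend.rsplit(' ', 1)
--             last = full_name[-1]
--             first = [full_name[0]]
--             update_dict(last, first[0], l2f)
--
--     for name in l2f:
--         l2f[name].sort()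
--
--     return l2f
-- ===== SOURCE B (Python) =====
-- def _pair(name):
--     first, sep, last = name.rpartition(' ')
--     return (last, first) if sep else (name, name)
--
--
-- def get_last_to_first(person_to_friends):
--     names = []
--     for person, friends in person_to_friends.items():
--         names.append(person)
--         names.extend(friends)
--     pairs = [_pair(n) for n in names]
--     l2f = {last: [] for last in dict.fromkeys(last for last, _ in pairs)}
--     prev = None
--     for pair in sorted(pairs):
--         if pair != prev:
--             l2f[pair[0]].append(pair[1])
--             prev = pair
--     return l2f
-- ===== Notes on version B (the rewrite author's own statement) =====
-- stated objective: alternative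
-- what changed: A dedups incrementally into a dict of lists via a mutating update_dict helper (per-insertion list-membership test) and then re-sorts every list in place; B instead flattens persons+friends into one (last, first) pair list, sorts that whole list once, and builds the dict in a single scan that appends each pair differing from the previously kept one, so per-key lists come out sorted and deduplicated with no membership tests and no final sort loop.
import Mathlib
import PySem

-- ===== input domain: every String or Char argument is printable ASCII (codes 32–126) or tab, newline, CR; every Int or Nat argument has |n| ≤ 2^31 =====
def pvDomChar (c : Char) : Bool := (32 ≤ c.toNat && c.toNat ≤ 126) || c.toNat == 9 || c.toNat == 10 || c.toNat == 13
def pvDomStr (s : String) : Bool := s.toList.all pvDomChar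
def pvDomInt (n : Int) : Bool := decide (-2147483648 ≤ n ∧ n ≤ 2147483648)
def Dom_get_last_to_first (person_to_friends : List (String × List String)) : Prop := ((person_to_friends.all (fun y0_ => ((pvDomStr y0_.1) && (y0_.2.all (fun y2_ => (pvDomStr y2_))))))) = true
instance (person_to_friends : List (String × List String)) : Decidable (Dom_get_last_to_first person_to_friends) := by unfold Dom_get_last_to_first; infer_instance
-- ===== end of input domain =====

-- B replaces A's incremental dict-of-dedup-lists (mutating update helper with a per-insertion
-- membership test plus a final in-place sort loop) by sorting one flat (last, first) pair list and
-- a single scan that appends each pair not equal to the previously kept one; same return value, proved equal.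

-- ===== PORT A =====
-- A-side primitive helper: name.rsplit(' ', 1)  (PySem has no rsplit); exact for separator ' ' and maxsplit 1
def pyRsplit1Space (s : String) : List String :=
  let rev := s.toList.reverse
  let suf := rev.takeWhile (fun c => c ≠ ' ')
  if suf.length = rev.length then [s]
  else [String.ofList ((rev.drop (suf.length + 1)).reverse), String.ofList (suf.reverse)]

-- A's inline pattern: full_name = name.rsplit(' ', 1); (full_name[-1], full_name[0])
def lastFirst (name : String) : String × String :=
  let full_name := pyRsplit1Space name
  (PySem.List.pyGetD full_name (-1) "", PySem.List.pyGetD full_name 0 "")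

def update_dict (key : String) (value : String) (key_to_values : PySem.Dict String (List String)) : PySem.Dict String (List String) :=
  let d := if key_to_values.contains key then key_to_values else key_to_values.insert key []
  if value ∈ d.getD key [] then d else PySem.Dict.modify d key [] (fun v => v ++ [value])

def get_last_to_first (person_to_friends : List (String × List String)) : List (String × List String) :=
  let l2f := person_to_friends.foldl (fun d p =>
      let q := lastFirst p.1
      let d := update_dict q.1 q.2 d
      p.2.foldl (fun d friend =>
        let q := lastFirst friend
        update_dict q.1 q.2 d) d)
    PySem.Dict.empty
  let l2f := l2f.keys.foldl (fun d name =>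
      PySem.Dict.modify d name [] (fun v => PySem.List.sorted v (fun x => x) false)) l2f
  l2f.items

-- ===== PORT B =====
-- B-side primitive helper: first, sep, last = name.rpartition(' '); (last, first) if sep else (name, name)
-- (rpartition(' ') ported by hand as a scan from the right; exact for the single-space separator)
def pairOf (name : String) : String × String :=
  let rev := name.toList.reverse
  let suf := rev.takeWhile (fun c => c ≠ ' ')
  if suf.length = rev.length then (name, name)
  else (String.ofList (suf.reverse), String.ofList ((rev.drop (suf.length + 1)).reverse))

def get_last_to_first_alt (person_to_friends : List (String × List String)) : List (String × List String) :=
  let names := person_to_friends.foldl (fun ns p => (ns ++ [p.1]) ++ p.2) []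
  let pairs := names.map pairOf
  let l2f := (PySem.List.dedup (pairs.map (fun q => q.1))).foldl
      (fun d k => d.insert k ([] : List String)) PySem.Dict.empty
  let res := (PySem.List.sorted2 pairs (fun q => q.1) (fun q => q.2) false).foldl
      (fun (st : PySem.Dict String (List String) × Option (String × String)) q =>
        if st.2 ≠ some q then (PySem.Dict.modify st.1 q.1 [] (fun v => v ++ [q.2]), some q) else st)
      (l2f, none)
  res.1.items

-- ===== PRECONDITION & SPEC =====
def Spec_get_last_to_first (person_to_friends : List (String × List String)) (out : List (String × List String)) : Prop := out = get_last_to_first_alt person_to_friends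
instance (person_to_friends : List (String × List String)) (out : List (String × List String)) : Decidable (Spec_get_last_to_first person_to_friends out) := by unfold Spec_get_last_to_first; infer_instance

-- ===== CLAIM (what is proved, stated in full; the proofs are below) =====
def Claim_equal_get_last_to_first : Prop := ∀ (person_to_friends : List (String × List String)), Dom_get_last_to_first person_to_friends → Spec_get_last_to_first person_to_friends (get_last_to_first person_to_friends)

-- ===== LEMMAS AND PROOFS =====

-- the flat pair list, the first-occurrence key list and the per-key deduped values
def pvPairs (ptf : List (String × List String)) : List (String × String) :=
  ptf.flatMap (fun p => (p.1 :: p.2).map lastFirst)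

def pvKeys (qs : List (String × String)) : List String := PySem.Set.ofList (qs.map (fun x => x.1))

def pvVals (qs : List (String × String)) (k : String) : List String :=
  PySem.Set.ofList ((qs.filter (fun x => x.1 == k)).map (fun x => x.2))

def updA (d : PySem.Dict String (List String)) (q : String × String) : PySem.Dict String (List String) :=
  update_dict q.1 q.2 d

lemma contains_mkmap (ks : List String) (g : String → List String) (x : String) :
    (PySem.Dict.mk (ks.map (fun k => (k, g k)))).contains x = decide (x ∈ ks) := by
  induction ks with
  | nil => rfl
  | cons k t ih =>
    simp only [PySem.Dict.contains, List.map_cons, List.any_cons] at ih ⊢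
    rw [ih]
    by_cases hx : k = x
    · simp [hx]
    · have hx' : ¬ x = k := fun e => hx e.symm
      simp [hx, hx']

lemma getD_mkmap_mem (ks : List String) (g : String → List String) (x : String) (d : List String)
    (h : x ∈ ks) : (PySem.Dict.mk (ks.map (fun k => (k, g k)))).getD x d = g x := by
  induction ks with
  | nil => cases h
  | cons k t ih =>
    by_cases hx : k = x
    · subst hx; simp [PySem.Dict.getD, PySem.Dict.get?]
    · have hm : x ∈ t := by cases h with | head => exact absurd rfl hx | tail _ h => exact h
      simpa [PySem.Dict.getD, PySem.Dict.get?, hx] using ih hm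

lemma insert_mkmap_mem (ks : List String) (g : String → List String) (x : String) (v : List String)
    (h : x ∈ ks) :
    (PySem.Dict.mk (ks.map (fun k => (k, g k)))).insert x v
      = PySem.Dict.mk (ks.map (fun k => (k, if k = x then v else g k))) := by
  have hc : (PySem.Dict.mk (ks.map (fun k => (k, g k)))).contains x = true := by
    rw [contains_mkmap]; simpa using h
  simp only [PySem.Dict.insert, hc, if_pos]
  congr 1
  rw [List.map_map]
  refine List.map_congr_left (fun k _ => ?_)
  by_cases hk : k = x <;> simp [hk]

lemma insert_mkmap_not_mem (ks : List String) (g : String → List String) (x : String) (v : List String)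
    (h : x ∉ ks) :
    (PySem.Dict.mk (ks.map (fun k => (k, g k)))).insert x v
      = PySem.Dict.mk (ks.map (fun k => (k, g k)) ++ [(x, v)]) := by
  have hc : (PySem.Dict.mk (ks.map (fun k => (k, g k)))).contains x = false := by
    rw [contains_mkmap]; simpa using h
  simp [PySem.Dict.insert, hc]

lemma pvKeys_append (qs : List (String × String)) (q : String × String) :
    pvKeys (qs ++ [q]) = if q.1 ∈ qs.map (fun x => x.1) then pvKeys qs else pvKeys qs ++ [q.1] := by
  unfold pvKeys
  by_cases h : q.1 ∈ qs.map (fun x => x.1) <;>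
    simp [PySem.Set.ofList_append_singleton, PySem.Set.mem_ofList, h]

lemma mem_pvKeys (qs : List (String × String)) (x : String) :
    x ∈ pvKeys qs ↔ x ∈ qs.map (fun p => p.1) := by
  simp [pvKeys, PySem.Set.mem_ofList]

lemma pvVals_append_self (qs : List (String × String)) (q : String × String) :
    pvVals (qs ++ [q]) q.1 = PySem.Set.add (pvVals qs q.1) q.2 := by
  simp [pvVals, List.filter_append, PySem.Set.ofList_append_singleton]

lemma pvVals_append_ne (qs : List (String × String)) (q : String × String) (k : String)
    (h : k ≠ q.1) : pvVals (qs ++ [q]) k = pvVals qs k := by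
  have hb : (q.1 == k) = false := by simpa using fun e => h e.symm
  simp [pvVals, List.filter_append, hb]

lemma pvVals_not_mem (qs : List (String × String)) (k : String)
    (h : k ∉ qs.map (fun p => p.1)) : pvVals qs k = [] := by
  have he : qs.filter (fun x => x.1 == k) = [] := by
    refine List.filter_eq_nil_iff.mpr (fun p hp => ?_)
    simp only [beq_iff_eq]
    intro e; exact h (List.mem_map.mpr ⟨p, hp, e⟩)
  simp [pvVals, he, PySem.Set.ofList]

-- A's accumulation loop, characterised
lemma A_inv (qs : List (String × String)) :
    (qs.foldl updA PySem.Dict.empty) = PySem.Dict.mk ((pvKeys qs).map (fun k => (k, pvVals qs k))) := by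
  induction qs using List.reverseRecOn with
  | nil => rfl
  | append_singleton qs q ih =>
    rw [List.foldl_append, List.foldl_cons, List.foldl_nil, ih]
    show update_dict q.1 q.2 _ = _
    unfold update_dict
    by_cases hl : q.1 ∈ qs.map (fun x => x.1)
    · have hk : q.1 ∈ pvKeys qs := (mem_pvKeys _ _).mpr hl
      have hc : (PySem.Dict.mk ((pvKeys qs).map (fun k => (k, pvVals qs k)))).contains q.1 = true := by
        rw [contains_mkmap]; simpa using hk
      simp only [hc, if_pos, getD_mkmap_mem _ _ _ _ hk]
      by_cases hf : q.2 ∈ pvVals qs q.1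
      · rw [if_pos hf, pvKeys_append, if_pos hl]
        congr 1
        refine List.map_congr_left (fun k _ => ?_)
        by_cases e : k = q.1
        · subst e; rw [pvVals_append_self, PySem.Set.add_of_mem hf]
        · rw [pvVals_append_ne _ _ _ e]
      · rw [if_neg hf]
        simp only [PySem.Dict.modify, getD_mkmap_mem _ _ _ _ hk]
        rw [insert_mkmap_mem _ _ _ _ hk, pvKeys_append, if_pos hl]
        congr 1
        refine List.map_congr_left (fun k _ => ?_)
        by_cases e : k = q.1
        · subst e
          rw [if_pos rfl, pvVals_append_self, PySem.Set.add_of_not_mem hf]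
        · rw [if_neg e, pvVals_append_ne _ _ _ e]
    · have hk : q.1 ∉ pvKeys qs := fun h => hl ((mem_pvKeys _ _).mp h)
      have hc : (PySem.Dict.mk ((pvKeys qs).map (fun k => (k, pvVals qs k)))).contains q.1 = false := by
        rw [contains_mkmap]; simpa using hk
      simp only [hc, Bool.false_eq_true, if_false]
      rw [insert_mkmap_not_mem _ _ _ _ hk]
      have hitems : (pvKeys qs).map (fun k => (k, pvVals qs k)) ++ [(q.1, ([] : List String))]
          = (pvKeys qs ++ [q.1]).map (fun k => (k, if k = q.1 then [] else pvVals qs k)) := by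
        rw [List.map_append]
        congr 1
        · refine List.map_congr_left (fun k hkm => ?_)
          rw [if_neg (by rintro rfl; exact hk hkm)]
        · simp
      rw [hitems]
      have hmem : q.1 ∈ pvKeys qs ++ [q.1] := by simp
      rw [getD_mkmap_mem _ _ _ _ hmem]
      rw [if_pos rfl, if_neg (by simp)]
      simp only [PySem.Dict.modify]
      rw [getD_mkmap_mem _ _ _ _ hmem, if_pos rfl]
      rw [insert_mkmap_mem _ _ _ _ hmem, pvKeys_append, if_neg hl]
      congr 1
      refine List.map_congr_left (fun k hkm => ?_)
      by_cases e : k = q.1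
      · subst e
        rw [if_pos rfl, pvVals_append_self, pvVals_not_mem qs _ hl]
        rfl
      · rw [if_neg e, if_neg e, pvVals_append_ne _ _ _ e]

-- A's final sort loop, characterised
lemma sort_loop (g : String → List String) (todo : List String) :
    ∀ (done : List (String × List String)), (∀ x ∈ todo, ∀ p ∈ done, p.1 ≠ x) → todo.Nodup →
    (todo.foldl (fun d name =>
        PySem.Dict.modify d name [] (fun v => PySem.List.sorted v (fun x => x) false))
        (PySem.Dict.mk (done ++ todo.map (fun k => (k, g k))))).items
      = done ++ todo.map (fun k => (k, PySem.List.sorted (g k) (fun x => x) false)) := by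
  induction todo with
  | nil => intro done _ _; simp
  | cons k rest ih =>
    intro done hdis hnd
    have hknr : k ∉ rest := (List.nodup_cons.mp hnd).1
    have hdone : ∀ p ∈ done, p.1 ≠ k := fun p hp => hdis k (by simp) p hp
    have hget : (PySem.Dict.mk (done ++ (k :: rest).map (fun k => (k, g k)))).getD k [] = g k := by
      simp only [PySem.Dict.getD, PySem.Dict.get?, List.map_cons, List.find?_append]
      have h1 : done.find? (fun p => p.1 == k) = none :=
        List.find?_eq_none.mpr (fun p hp => by simpa using hdone p hp)
      simp [h1]
    have hcon : (PySem.Dict.mk (done ++ (k :: rest).map (fun k => (k, g k)))).contains k = true := by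
      simp [PySem.Dict.contains, List.any_append]
    have hstep : PySem.Dict.modify (PySem.Dict.mk (done ++ (k :: rest).map (fun k => (k, g k)))) k []
          (fun v => PySem.List.sorted v (fun x => x) false)
        = PySem.Dict.mk ((done ++ [(k, PySem.List.sorted (g k) (fun x => x) false)])
            ++ rest.map (fun k => (k, g k))) := by
      simp only [PySem.Dict.modify, hget, PySem.Dict.insert, hcon, if_pos]
      congr 1
      rw [List.map_cons, List.map_append, List.map_cons, List.map_map]
      have h1 : done.map (fun p => if (p.1 == k) = true
            then (k, PySem.List.sorted (g k) (fun x => x) false) else p) = done := by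
        have := List.map_congr_left (l := done)
          (f := fun p => if (p.1 == k) = true
            then (k, PySem.List.sorted (g k) (fun x => x) false) else p) (g := id)
          (fun p hp => by
            have hb : (p.1 == k) = false := by simpa using hdone p hp
            simp [hb])
        simpa using this
      have h2 : rest.map ((fun p => if (p.1 == k) = true
            then (k, PySem.List.sorted (g k) (fun x => x) false) else p) ∘ (fun k => (k, g k)))
          = rest.map (fun k => (k, g k)) := by
        refine List.map_congr_left (fun k' hk' => ?_)
        have hne : k' ≠ k := fun e => hknr (by rw [← e]; exact hk')
        simp [hne]
      rw [h1, h2]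
      simp
    rw [List.foldl_cons, hstep, ih (done ++ [(k, PySem.List.sorted (g k) (fun x => x) false)])
      (fun x hx p hp => ?_) (List.nodup_cons.mp hnd).2]
    · simp
    · rcases List.mem_append.mp hp with hp | hp
      · exact hdis x (by simp [hx]) p hp
      · simp only [List.mem_singleton] at hp
        subst hp
        rintro rfl
        exact hknr hx

-- flatten A's nested loop into a single fold over the flat pair list
lemma A_flatten (ptf : List (String × List String)) (d0 : PySem.Dict String (List String)) :
    ptf.foldl (fun d p =>
      p.2.foldl (fun d friend => update_dict (lastFirst friend).1 (lastFirst friend).2 d)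
        (update_dict (lastFirst p.1).1 (lastFirst p.1).2 d)) d0
    = (pvPairs ptf).foldl updA d0 := by
  induction ptf generalizing d0 with
  | nil => rfl
  | cons p t ih =>
    have h1 : pvPairs (p :: t) = (p.1 :: p.2).map lastFirst ++ pvPairs t := by
      simp [pvPairs]
    rw [List.foldl_cons, ih, h1, List.foldl_append, List.foldl_map, List.foldl_cons]
    rfl

-- A's whole result, characterised
lemma A_items (ptf : List (String × List String)) :
    get_last_to_first ptf
      = (pvKeys (pvPairs ptf)).map
          (fun k => (k, PySem.List.sorted (pvVals (pvPairs ptf) k) (fun x => x) false)) := by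
  simp only [get_last_to_first]
  rw [A_flatten, A_inv]
  have hkeys : (PySem.Dict.mk ((pvKeys (pvPairs ptf)).map
      (fun k => (k, pvVals (pvPairs ptf) k)))).keys = pvKeys (pvPairs ptf) := by
    simp only [PySem.Dict.keys, List.map_map]
    have hid : ((fun x : String × List String => x.1) ∘ fun k => (k, pvVals (pvPairs ptf) k)) = id := rfl
    rw [hid, List.map_id]
  rw [hkeys]
  have hsl := sort_loop (fun k => pvVals (pvPairs ptf) k) (pvKeys (pvPairs ptf)) []
    (by simp) (PySem.Set.nodup_ofList _)
  simp only [List.nil_append] at hsl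
  rw [hsl]

-- ---------- B side ----------

-- B's rpartition-based helper computes the same (last, first) pair as A's rsplit-based one
lemma lastFirst_eq_pairOf (name : String) : lastFirst name = pairOf name := by
  unfold lastFirst pairOf pyRsplit1Space
  dsimp only
  split_ifs with h <;>
    simp [PySem.List.pyGetD, PySem.List.pyGet?, PySem.List.pyIdx?]

-- lexicographic tuple order on (last, first) pairs, as Python's '<' on string pairs
def pLt (q r : String × String) : Prop := q.1 < r.1 ∨ (q.1 = r.1 ∧ q.2 < r.2)

lemma pLt_iff_bLt (q r : String × String) :
    (decide (q.1 < r.1) || (!decide (r.1 < q.1) && decide (q.2 < r.2))) = true ↔ pLt q r := by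
  unfold pLt
  rcases lt_trichotomy q.1 r.1 with h | h | h
  · simp [h, asymm h]
  · simp [h]
  · simp [h, asymm h, ne_of_gt h]

lemma pLt_asymm {q r : String × String} (h : pLt q r) : ¬ pLt r q := by
  rcases h with h | ⟨h1, h2⟩
  · rintro (h' | ⟨h1', _⟩)
    · exact absurd h' (asymm h)
    · exact absurd h1' (ne_of_gt h)
  · rintro (h' | ⟨_, h2'⟩)
    · exact absurd h' (by rw [h1]; exact lt_irrefl _)
    · exact absurd h2' (asymm h2)

lemma pLt_trans {a b c : String × String} (h1 : pLt a b) (h2 : pLt b c) : pLt a c := by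
  rcases h1 with h1 | ⟨e1, l1⟩ <;> rcases h2 with h2 | ⟨e2, l2⟩
  · exact Or.inl (lt_trans h1 h2)
  · exact Or.inl (e2 ▸ h1)
  · exact Or.inl (e1 ▸ h2)
  · exact Or.inr ⟨e1.trans e2, lt_trans l1 l2⟩

lemma pLt_connex {q r : String × String} (h1 : ¬ pLt q r) (h2 : ¬ pLt r q) : q = r := by
  unfold pLt at h1 h2
  push Not at h1 h2
  have e1 : ¬ q.1 < r.1 := fun h => h1.1 h
  have e2 : ¬ r.1 < q.1 := fun h => h2.1 h
  have e : q.1 = r.1 := le_antisymm (le_of_not_gt e2) (le_of_not_gt e1)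
  have f1 : ¬ q.2 < r.2 := h1.2 e
  have f2 : ¬ r.2 < q.2 := h2.2 e.symm
  exact Prod.ext e (le_antisymm (le_of_not_gt f2) (le_of_not_gt f1))

-- sorted(pairs) is ordered under pLt
lemma insertBy_pairwise (x : String × String) (ys : List (String × String))
    (h : ys.Pairwise (fun a b => ¬ pLt b a)) :
    (PySem.List.insertBy
        (fun a b => decide (a.1 < b.1) || (!decide (b.1 < a.1) && decide (a.2 < b.2))) x ys).Pairwise
      (fun a b => ¬ pLt b a) := by
  induction ys with
  | nil => simp [PySem.List.insertBy]
  | cons y t ih =>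
    rw [PySem.List.insertBy]
    by_cases hb : (decide (x.1 < y.1) || (!decide (y.1 < x.1) && decide (x.2 < y.2))) = true
    · rw [if_pos hb]
      have hxy : pLt x y := (pLt_iff_bLt x y).mp hb
      refine List.Pairwise.cons ?_ h
      intro z hz
      rcases List.mem_cons.mp hz with rfl | hz
      · exact pLt_asymm hxy
      · have hyz : ¬ pLt z y := (List.pairwise_cons.mp h).1 z hz
        exact fun hzx => hyz (pLt_trans hzx hxy)
    · rw [if_neg hb]
      have hxy : ¬ pLt x y := fun hp => hb ((pLt_iff_bLt x y).mpr hp)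
      refine List.Pairwise.cons ?_ (ih (List.pairwise_cons.mp h).2)
      intro z hz
      rcases (PySem.List.mem_insertBy _ _ _ _).mp hz with rfl | hz
      · exact hxy
      · exact (List.pairwise_cons.mp h).1 z hz

lemma sorted2_pairwise (xs : List (String × String)) :
    (PySem.List.sorted2 xs (fun q => q.1) (fun q => q.2) false).Pairwise (fun a b => ¬ pLt b a) := by
  show (xs.foldl (fun acc x => PySem.List.insertBy
      (fun a b => decide (a.1 < b.1) || (!decide (b.1 < a.1) && decide (a.2 < b.2))) x acc)
      []).Pairwise (fun a b => ¬ pLt b a)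
  have : ∀ (l : List (String × String)) (acc : List (String × String)),
      acc.Pairwise (fun a b => ¬ pLt b a) →
      (l.foldl (fun acc x => PySem.List.insertBy
        (fun a b => decide (a.1 < b.1) || (!decide (b.1 < a.1) && decide (a.2 < b.2))) x acc)
        acc).Pairwise (fun a b => ¬ pLt b a) := by
    intro l
    induction l with
    | nil => intro acc h; exact h
    | cons x t ih => intro acc h; exact ih _ (insertBy_pairwise x acc h)
  exact this xs [] (by simp)

-- the prev-skip scan keeps exactly the adjacent-dedup of its input
def dedupAdj : Option (String × String) → List (String × String) → List (String × String)
  | _, [] => []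
  | prev, q :: t => if prev ≠ some q then q :: dedupAdj (some q) t else dedupAdj prev t

lemma dedupAdj_spec : ∀ (L : List (String × String)), L.Pairwise (fun a b => ¬ pLt b a) →
    ∀ (prev : Option (String × String)), (∀ p, prev = some p → ∀ x ∈ L, ¬ pLt x p) →
    (dedupAdj prev L).Pairwise pLt ∧
    (∀ p, prev = some p → ∀ x ∈ dedupAdj prev L, pLt p x) ∧
    (∀ x, x ∈ dedupAdj prev L ↔ x ∈ L ∧ prev ≠ some x) := by
  intro L
  induction L with
  | nil =>
    intro _ prev _
    refine ⟨List.Pairwise.nil, fun _ _ x h => absurd h (by simp [dedupAdj]), fun x => by simp [dedupAdj]⟩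
  | cons q t ih =>
    intro hs prev hinv
    have hts : t.Pairwise (fun a b => ¬ pLt b a) := (List.pairwise_cons.mp hs).2
    have hhead : ∀ x ∈ t, ¬ pLt x q := (List.pairwise_cons.mp hs).1
    have ihk := ih hts (some q) (fun p hp x hx => by cases hp; exact hhead x hx)
    by_cases hb : prev ≠ some q
    · rw [dedupAdj, if_pos hb]
      have hq_all : ∀ p, prev = some p → pLt p q := by
        intro p hp
        have h1 : ¬ pLt q p := hinv p hp q (by simp)
        have h2 : p ≠ q := fun e => hb (by rw [hp, e])
        by_contra h3
        exact h2 (pLt_connex h3 h1)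
      refine ⟨List.Pairwise.cons (fun z hz => ihk.2.1 q rfl z hz) ihk.1, ?_, ?_⟩
      · intro p hp x hx
        rcases List.mem_cons.mp hx with rfl | hx
        · exact hq_all p hp
        · exact pLt_trans (hq_all p hp) (ihk.2.1 q rfl x hx)
      · intro x
        constructor
        · intro hx
          rcases List.mem_cons.mp hx with rfl | hx
          · exact ⟨by simp, hb⟩
          · obtain ⟨hxt, hxq⟩ := (ihk.2.2 x).mp hx
            have hxnq : x ≠ q := fun e => hxq (by rw [e])
            refine ⟨by simp [hxt], ?_⟩
            intro hpx
            have h1 : ¬ pLt q x := hinv x hpx q (by simp)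
            have h2 : ¬ pLt x q := hhead x hxt
            exact hxnq (pLt_connex h2 h1)
        · rintro ⟨hx, hne⟩
          rcases List.mem_cons.mp hx with rfl | hx
          · exact List.mem_cons_self
          · by_cases e : x = q
            · subst e; exact List.mem_cons_self
            · exact List.mem_cons_of_mem _ ((ihk.2.2 x).mpr ⟨hx, fun h => e (Option.some.inj h).symm⟩)
    · have hprev : prev = some q := not_not.mp (by simpa using hb)
      rw [dedupAdj, if_neg hb]
      subst hprev
      refine ⟨ihk.1, fun p hp => by cases hp; exact ihk.2.1 q rfl, ?_⟩
      intro x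
      rw [ihk.2.2 x]
      constructor
      · rintro ⟨hxt, hne⟩; exact ⟨List.mem_cons_of_mem _ hxt, hne⟩
      · rintro ⟨hx, hne⟩
        rcases List.mem_cons.mp hx with rfl | hx
        · exact absurd rfl hne
        · exact ⟨hx, hne⟩

-- the scan in B's port, reduced to a plain fold over the kept pairs
lemma scan_eq_dedup : ∀ (L : List (String × String)) (d : PySem.Dict String (List String))
    (prev : Option (String × String)),
    (L.foldl (fun (st : PySem.Dict String (List String) × Option (String × String)) q =>
        if st.2 ≠ some q then (PySem.Dict.modify st.1 q.1 [] (fun v => v ++ [q.2]), some q) else st)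
      (d, prev)).1
    = (dedupAdj prev L).foldl (fun d q => PySem.Dict.modify d q.1 [] (fun v => v ++ [q.2])) d := by
  intro L
  induction L with
  | nil => intro d prev; rfl
  | cons q t ih =>
    intro d prev
    by_cases hb : prev ≠ some q
    · rw [List.foldl_cons, dedupAdj, if_pos hb, if_pos hb, List.foldl_cons]
      exact ih _ _
    · rw [List.foldl_cons, dedupAdj, if_neg hb, if_neg hb]
      exact ih _ _

-- B's list-building loop is the same flat name list A's nested loop walks
lemma names_foldl (ptf : List (String × List String)) :
    ∀ acc, ptf.foldl (fun ns p => (ns ++ [p.1]) ++ p.2) acc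
      = acc ++ ptf.flatMap (fun p => p.1 :: p.2) := by
  induction ptf with
  | nil => intro acc; simp
  | cons p t ih =>
    intro acc
    rw [List.foldl_cons, ih]
    simp

lemma pairs_eq (ptf : List (String × List String)) :
    (ptf.foldl (fun ns p => (ns ++ [p.1]) ++ p.2) []).map pairOf = pvPairs ptf := by
  rw [names_foldl ptf [], List.nil_append, List.map_flatMap]
  unfold pvPairs
  have h : lastFirst = pairOf := funext lastFirst_eq_pairOf
  rw [h]

lemma getD_foldl_insert_nil : ∀ (l : List String) (d : PySem.Dict String (List String)) (x : String),
    d.getD x [] = [] → (l.foldl (fun d k => d.insert k ([] : List String)) d).getD x [] = [] := by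
  intro l
  induction l with
  | nil => intro d x h; exact h
  | cons k t ih =>
    intro d x h
    rw [List.foldl_cons]
    refine ih _ _ ?_
    rw [PySem.Dict.getD_insert]
    split_ifs <;> simp [h]

-- per-key: the kept pairs with last name k carry exactly sorted(set(firsts of k))
lemma kept_vals (pairs : List (String × String)) (k : String) :
    ((dedupAdj none (PySem.List.sorted2 pairs (fun q => q.1) (fun q => q.2) false)).filter
        (fun q => q.1 == k)).map (fun q => q.2)
      = PySem.List.sorted (pvVals pairs k) (fun x => x) false := by
  have hK := dedupAdj_spec (PySem.List.sorted2 pairs (fun q => q.1) (fun q => q.2) false)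
    (sorted2_pairwise pairs) none (by simp)
  set S := PySem.List.sorted2 pairs (fun q => q.1) (fun q => q.2) false with hS
  set K := dedupAdj none S with hKdef
  have hmemK : ∀ x, x ∈ K ↔ x ∈ pairs := by
    intro x
    rw [hK.2.2 x, hS]
    have := (PySem.List.sorted2_perm pairs (fun q => q.1) (fun q => q.2) false).mem_iff (a := x)
    simp [this]
  set ys := (K.filter (fun q => q.1 == k)).map (fun q => q.2) with hys
  have hpw : ys.Pairwise (fun a b => a < b) := by
    rw [hys, List.pairwise_map]
    have h1 : (K.filter (fun q => q.1 == k)).Pairwise pLt := hK.1.filter _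
    refine h1.imp_of_mem ?_
    intro a b ha hb hab
    have hak : a.1 = k := by simpa using (List.mem_filter.mp ha).2
    have hbk : b.1 = k := by simpa using (List.mem_filter.mp hb).2
    rcases hab with h | ⟨_, h⟩
    · exact absurd (hak.trans hbk.symm) (ne_of_lt h)
    · exact h
  have hmem : ∀ x, x ∈ ys ↔ (k, x) ∈ pairs := by
    intro x
    rw [hys]
    simp only [List.mem_map, List.mem_filter]
    constructor
    · rintro ⟨q, ⟨hq, hqk⟩, rfl⟩
      have : q.1 = k := by simpa using hqk
      have : q = (k, q.2) := Prod.ext this rfl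
      rw [← this]
      exact (hmemK q).mp hq
    · intro h
      exact ⟨(k, x), ⟨(hmemK _).mpr h, by simp⟩, rfl⟩
  have hmemv : ∀ x, x ∈ pvVals pairs k ↔ (k, x) ∈ pairs := by
    intro x
    unfold pvVals
    rw [PySem.Set.mem_ofList]
    simp only [List.mem_map, List.mem_filter]
    constructor
    · rintro ⟨q, ⟨hq, hqk⟩, rfl⟩
      have : q.1 = k := by simpa using hqk
      have : q = (k, q.2) := Prod.ext this rfl
      rw [← this]
      exact hq
    · intro h
      exact ⟨(k, x), ⟨h, by simp⟩, rfl⟩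
  have hnys : ys.Nodup := hpw.imp (fun h => ne_of_lt h)
  have hnv : (pvVals pairs k).Nodup := PySem.Set.nodup_ofList _
  have hperm : ys.Perm (pvVals pairs k) :=
    (List.perm_ext_iff_of_nodup hnys hnv).mpr (fun x => (hmem x).trans (hmemv x).symm)
  exact (PySem.List.sorted_eq_of_perm_of_pairwise_lt _ _ (fun x => x) hperm hpw).symm

-- B's whole result, characterised
lemma B_items (ptf : List (String × List String)) :
    get_last_to_first_alt ptf
      = (pvKeys (pvPairs ptf)).map
          (fun k => (k, PySem.List.sorted (pvVals (pvPairs ptf) k) (fun x => x) false)) := by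
  simp only [get_last_to_first_alt]
  rw [pairs_eq]
  set pairs := pvPairs ptf with hpairs
  have hkeys0 : PySem.List.dedup (pairs.map (fun q => q.1)) = pvKeys pairs := by
    rw [PySem.List.dedup_eq_ofList]; rfl
  rw [hkeys0]
  set d0 := (pvKeys pairs).foldl (fun d k => d.insert k ([] : List String)) PySem.Dict.empty with hd0
  have hd0keys : d0.keys = pvKeys pairs := by
    rw [hd0, PySem.Dict.keys_foldl_insert]
    have : (PySem.Dict.empty : PySem.Dict String (List String)).keys = [] := rfl
    rw [this, PySem.Set.update_nil_left]
    exact PySem.Set.ofList_eq_self_of_nodup _ (PySem.Set.nodup_ofList _)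
  have hd0getD : ∀ x, d0.getD x [] = [] := fun x =>
    getD_foldl_insert_nil _ _ _ (by rfl)
  rw [scan_eq_dedup]
  set K := dedupAdj none (PySem.List.sorted2 pairs (fun q => q.1) (fun q => q.2) false) with hK
  set d1 := K.foldl (fun d q => PySem.Dict.modify d q.1 [] (fun v => v ++ [q.2])) d0 with hd1
  have hmemK : ∀ x, x ∈ K ↔ x ∈ pairs := by
    intro x
    have hspec := dedupAdj_spec (PySem.List.sorted2 pairs (fun q => q.1) (fun q => q.2) false)
      (sorted2_pairwise pairs) none (by simp)
    rw [hK, hspec.2.2 x]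
    have := (PySem.List.sorted2_perm pairs (fun q => q.1) (fun q => q.2) false).mem_iff (a := x)
    simp [this]
  have hd1keys : d1.keys = pvKeys pairs := by
    rw [hd1, PySem.Dict.keys_foldl_modify_key, hd0keys, PySem.Set.update_eq_append_filter]
    have hnil : (PySem.Set.ofList (K.map (fun q => q.1))).filter
        (fun y => !(PySem.Set.contains (pvKeys pairs) y)) = [] := by
      refine List.filter_eq_nil_iff.mpr (fun y hy => ?_)
      have hy' : y ∈ K.map (fun q => q.1) := (PySem.Set.mem_ofList _ _).mp hy
      obtain ⟨q, hq, rfl⟩ := List.mem_map.mp hy'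
      have : q.1 ∈ pairs.map (fun x => x.1) := List.mem_map.mpr ⟨q, (hmemK q).mp hq, rfl⟩
      simp [(mem_pvKeys pairs q.1).mpr this]
    rw [hnil, List.append_nil]
  have hd1nodup : d1.keys.Nodup := by
    rw [hd1keys]; exact PySem.Set.nodup_ofList _
  rw [PySem.Dict.items_eq_map_keys d1 hd1nodup [], hd1keys]
  refine List.map_congr_left (fun k _ => ?_)
  have : d1.getD k [] = d0.getD k [] ++ (K.filter (fun q => q.1 == k)).map (fun q => q.2) := by
    rw [hd1]
    exact PySem.Dict.getD_foldl_modify_append K d0 k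
  rw [this, hd0getD, List.nil_append, hK, kept_vals]

-- ===== VERDICT (by name: the statement is the Claim_ definition above) =====
theorem get_last_to_first_spec : Claim_equal_get_last_to_first := by
  intro ptf _
  show get_last_to_first ptf = get_last_to_first_alt ptf
  rw [A_items, B_items]
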